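-- pv_equiv track=rewrite | github.com/ultimate-pa/ultimate | trunk/examples/programs/scalable/generateCounter.py | genIfs
-- ===== SOURCE A (Python) =====
-- bitCount = 8
--
-- def genIfs(counter):
-- 	if(counter == 0):
-- 		return ""
-- 	else:
-- 		curX = "x" + str(bitCount - counter)
-- 		progPart = "if ( " + curX + " == 0) { " + curX + " := 1; }\n"
-- 		progPart += "else {\n"
-- 		progPart += curX + " := 0;\n"
-- 		progPart += genIfs(counter -1)
-- 		progPart += "}\n"
-- 		return progPart
-- ===== SOURCE B (Python) =====
-- bitCount = 8
--
-- def genIfs(counter):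
--     opens = []
--     for i in range(counter):
--         curX = "x" + str(bitCount - counter + i)
--         opens.append("if ( " + curX + " == 0) { " + curX + " := 1; }\nelse {\n" + curX + " := 0;\n")
--     return "".join(opens) + "}\n" * counter
-- ===== Notes on version B (the rewrite author's own statement) =====
-- stated objective: simpler
-- what changed: Replaces the nested recursion by a flat loop that emits the i-th open block (variable x(bitCount-counter+i)) into a list, then joins them and appends counter closing braces with string repetition.
import Mathlib
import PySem

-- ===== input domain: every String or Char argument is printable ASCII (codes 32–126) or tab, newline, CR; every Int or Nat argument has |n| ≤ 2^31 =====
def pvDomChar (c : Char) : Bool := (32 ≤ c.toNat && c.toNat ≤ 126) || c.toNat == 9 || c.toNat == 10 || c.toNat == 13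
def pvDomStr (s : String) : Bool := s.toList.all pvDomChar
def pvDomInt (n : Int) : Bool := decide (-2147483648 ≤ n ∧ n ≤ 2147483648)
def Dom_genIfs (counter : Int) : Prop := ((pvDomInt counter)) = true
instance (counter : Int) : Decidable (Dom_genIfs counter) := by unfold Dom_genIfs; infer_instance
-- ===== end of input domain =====

-- B replaces A's nested recursion by a flat loop over range(counter) joined with counter closing braces (objective: simpler).

-- ===== PORT A =====
-- A recurses on counter; the Nat fuel counter.toNat is exactly the recursion depth on the
-- admitted inputs (Pre_: 0 ≤ counter); for counter < 0 Python never returns (RecursionError).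
def genIfsAux : Nat → Int → String
  | 0, _ => ""
  | fuel + 1, counter =>
    if counter == 0 then ""
    else
      let curX := "x" ++ PySem.Int.toStr (8 - counter)
      "if ( " ++ curX ++ " == 0) { " ++ curX ++ " := 1; }\n"
        ++ "else {\n"
        ++ (curX ++ " := 0;\n")
        ++ genIfsAux fuel (counter - 1)
        ++ "}\n"

def genIfs (counter : Int) : String := genIfsAux counter.toNat counter

-- ===== PORT B =====
-- the open block appended for loop index i in Source B
def pvBlock (counter i : Int) : String :=
  let curX := "x" ++ PySem.Int.toStr (8 - counter + i)
  "if ( " ++ curX ++ " == 0) { " ++ curX ++ " := 1; }\nelse {\n" ++ curX ++ " := 0;\n"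

def genIfs_alt (counter : Int) : String :=
  let opens := (PySem.List.pyRange 0 counter 1).map (pvBlock counter)
  String.join opens ++ String.join (List.replicate counter.toNat "}\n")

-- ===== PRECONDITION & SPEC =====
-- Pre_ excludes counter < 0, on which Python's A recurses forever (RecursionError).
def Pre_genIfs (counter : Int) : Prop := 0 ≤ counter
instance (counter : Int) : Decidable (Pre_genIfs counter) := by unfold Pre_genIfs; infer_instance
def pvWitness_genIfs : Int := (3)

def Spec_genIfs (counter : Int) (out : String) : Prop := out = genIfs_alt counter
instance (counter : Int) (out : String) : Decidable (Spec_genIfs counter out) := by unfold Spec_genIfs; infer_instance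

-- ===== CLAIM (what is proved, stated in full; the proofs are below) =====
def Claim_equal_genIfs : Prop := ∀ (counter : Int), Dom_genIfs counter → Pre_genIfs counter → Spec_genIfs counter (genIfs counter)

-- ===== LEMMAS AND PROOFS =====

lemma join_cons' (a : String) (l : List String) : String.join (a :: l) = a ++ String.join l := by
  simp [String.join_eq]

-- counter copies of "}\n" commute with one more copy
lemma join_rep_comm (m : Nat) (s : String) :
    String.join (List.replicate m s) ++ s = s ++ String.join (List.replicate m s) := by
  induction m with
  | zero => show String.join [] ++ s = s ++ String.join []; simp [String.join_eq]
  | succ k ih => rw [List.replicate_succ, join_cons', String.append_assoc, ih]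

-- merging A's two adjacent literals into B's single literal
lemma lit_merge (s : String) :
    " := 1; }\n" ++ ("else {\n" ++ s) = " := 1; }\nelse {\n" ++ s := by
  rw [← String.append_assoc]; congr 1

-- B's result with the range written as List.range over Nat
lemma alt_eq_range (counter : Int) :
    genIfs_alt counter =
      String.join ((List.range counter.toNat).map (fun (k : Nat) => pvBlock counter (k : Int)))
        ++ String.join (List.replicate counter.toNat "}\n") := by
  simp only [genIfs_alt]
  rw [PySem.List.pyRange_one, List.map_map, Int.sub_zero]
  congr 2
  apply List.map_congr_left
  intro k _
  simp

-- core induction: A's recursion at fuel n on input n equals B's flat shape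
lemma aux_eq (n : Nat) :
    genIfsAux n (n : Int) =
      String.join ((List.range n).map (fun (k : Nat) => pvBlock (n : Int) (k : Int)))
        ++ String.join (List.replicate n "}\n") := by
  induction n with
  | zero => rfl
  | succ m ih =>
    have hcast : ((m + 1 : Nat) : Int) - 1 = (m : Int) := by push_cast; ring
    have hstep : genIfsAux (m + 1) ((m + 1 : Nat) : Int)
        = "if ( " ++ ("x" ++ PySem.Int.toStr (8 - ((m + 1 : Nat) : Int))) ++ " == 0) { "
            ++ ("x" ++ PySem.Int.toStr (8 - ((m + 1 : Nat) : Int))) ++ " := 1; }\n"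
            ++ "else {\n"
            ++ (("x" ++ PySem.Int.toStr (8 - ((m + 1 : Nat) : Int))) ++ " := 0;\n")
            ++ genIfsAux m (((m + 1 : Nat) : Int) - 1) ++ "}\n" := by
      simp [genIfsAux]
      omega
    have hhead : pvBlock ((m + 1 : Nat) : Int) ((0 : Nat) : Int)
        = "if ( " ++ ("x" ++ PySem.Int.toStr (8 - ((m + 1 : Nat) : Int))) ++ " == 0) { "
            ++ ("x" ++ PySem.Int.toStr (8 - ((m + 1 : Nat) : Int))) ++ " := 1; }\nelse {\n"
            ++ ("x" ++ PySem.Int.toStr (8 - ((m + 1 : Nat) : Int))) ++ " := 0;\n" := by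
      simp only [pvBlock]
      norm_num
    have hmap : (List.range m).map ((fun (k : Nat) => pvBlock ((m + 1 : Nat) : Int) (k : Int)) ∘ Nat.succ)
        = (List.range m).map (fun (k : Nat) => pvBlock ((m : Nat) : Int) (k : Int)) := by
      apply List.map_congr_left
      intro k _
      show pvBlock ((m + 1 : Nat) : Int) ((k + 1 : Nat) : Int) = pvBlock ((m : Nat) : Int) (k : Int)
      simp only [pvBlock]
      have h8 : (8 : Int) - ((m + 1 : Nat) : Int) + ((k + 1 : Nat) : Int)
           = 8 - ((m : Nat) : Int) + (k : Int) := by push_cast; ring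
      rw [h8]
    rw [hstep, hcast, ih, List.range_succ_eq_map, List.map_cons, List.map_map, hmap,
        List.replicate_succ, join_cons', join_cons', hhead]
    simp only [String.append_assoc]
    rw [lit_merge, join_rep_comm m "}\n"]

-- ===== VERDICT (by name: the statement is the Claim_ definition above) =====
theorem genIfs_spec : Claim_equal_genIfs := by
  intro counter _ hpre
  unfold Spec_genIfs genIfs
  have h0 : ((counter.toNat : Nat) : Int) = counter := Int.toNat_of_nonneg hpre
  have h := aux_eq counter.toNat
  rw [h0] at h
  rw [h, alt_eq_range counter]
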